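-- pv_equiv track=rewrite | github.com/wlruys/task4feedback | experiments/sweep_partitions.py | generate_ordered_sequences
-- ===== SOURCE A (Python) =====
-- def generate_ordered_sequences(blocks, target):
--     """
--     All ordered sequences of 'blocks' summing to 'target'.
--     NOTE: This can blow up combinatorially; consider constraining 'blocks' or 'target'
--     if needed for practicality.
--     """
--     result = []
--
--     def backtrack(remaining, path):
--         if remaining == 0:
--             result.append(path[:])
--             return
--         for b in blocks:
--             if b <= remaining:
--                 path.append(b)
--                 backtrack(remaining - b, path)
--                 path.pop()
--
--     backtrack(target, [])
--     return result
-- ===== SOURCE B (Python) =====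
-- def generate_ordered_sequences(blocks, target):
--     """
--     All ordered sequences of 'blocks' summing to 'target'.
--     Bottom-up DP: seqs[s] holds all ordered sequences summing to s.
--     """
--     if target < 0:
--         return []
--     seqs = [[[]]]
--     for s in range(1, target + 1):
--         seqs.append([[b] + rest for b in blocks if b <= s for rest in seqs[s - b]])
--     return seqs[target]
-- ===== Notes on version B (the rewrite author's own statement) =====
-- stated objective: alternative
-- what changed: Replaces recursive backtracking over a mutable path with a bottom-up DP table seqs[s] of all sequences summing to s, built once from 0 to target.
-- outside the precondition, e.g. on generate_ordered_sequences([-1], -1): A returns [[-1]], B returns []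
import Mathlib
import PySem

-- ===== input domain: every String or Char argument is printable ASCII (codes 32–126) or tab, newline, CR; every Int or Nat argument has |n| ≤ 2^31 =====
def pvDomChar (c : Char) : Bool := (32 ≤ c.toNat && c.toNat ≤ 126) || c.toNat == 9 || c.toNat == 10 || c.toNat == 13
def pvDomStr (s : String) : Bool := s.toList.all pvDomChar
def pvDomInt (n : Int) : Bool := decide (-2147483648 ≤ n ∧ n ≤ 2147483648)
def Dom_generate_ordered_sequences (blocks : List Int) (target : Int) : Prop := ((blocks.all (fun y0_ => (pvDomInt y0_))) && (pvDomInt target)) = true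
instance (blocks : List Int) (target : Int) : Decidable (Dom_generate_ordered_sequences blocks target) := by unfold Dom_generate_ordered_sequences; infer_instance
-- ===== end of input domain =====

-- B replaces A's recursive backtracking over a mutable path by a bottom-up DP table
-- indexed by subsum (objective: alternative algorithm, same output order).

-- ===== PORT A =====
-- backtrack's body: 'bs' is the part of the for-loop over 'blocks' still to run at the
-- current level, 'remaining'/'path' as in A.  The 'remaining == 0' check of the Python
-- recursive call is performed at the call site; the '0 < b' conjunct only makes the
-- recursion total (Python diverges on nonpositive blocks, outside Pre_).
def pvBacktrack (blocks : List Int) (remaining : Int) (bs : List Int) (path : List Int) :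
    List (List Int) :=
  match bs with
  | [] => []
  | b :: rest =>
    (if _h : b ≤ remaining ∧ 0 < b then
       (if remaining - b = 0 then [path ++ [b]]
        else pvBacktrack blocks (remaining - b) blocks (path ++ [b]))
     else []) ++ pvBacktrack blocks remaining rest path
termination_by (remaining.toNat, bs.length)
decreasing_by
  · apply Prod.Lex.left; omega
  · apply Prod.Lex.right; simp

def generate_ordered_sequences (blocks : List Int) (target : Int) : List (List Int) :=
  if target = 0 then [[]] else pvBacktrack blocks target blocks []

-- ===== PORT B =====
def generate_ordered_sequences_alt (blocks : List Int) (target : Int) : List (List Int) :=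
  if target < 0 then []
  else
    let n := target.toNat
    let seqs := (List.range n).foldl
      (fun seqs (i : Nat) =>
        let s : Int := (i : Int) + 1
        seqs ++ [blocks.flatMap (fun b =>
          if b ≤ s then (seqs.getD (s - b).toNat []).map (fun rest => b :: rest) else [])])
      [[[]]]
    seqs.getD n []

-- ===== PRECONDITION & SPEC =====
-- Pre_ excludes inputs containing a nonpositive block whose backtracking can start
-- (target ≠ 0 and some block ≤ target when target < 0): there A's recursion diverges
-- on almost all such inputs (and B's DP would index out of range), returning only on
-- accidental corners like ([-1], -1).
def Pre_generate_ordered_sequences (blocks : List Int) (target : Int) : Prop :=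
  target = 0 ∨ (∀ b ∈ blocks, 0 < b) ∨ (target < 0 ∧ ∀ b ∈ blocks, target < b)
instance (blocks : List Int) (target : Int) : Decidable (Pre_generate_ordered_sequences blocks target) := by unfold Pre_generate_ordered_sequences; infer_instance

def pvWitness_generate_ordered_sequences : List Int × Int := ([1, 2], 3)

def Spec_generate_ordered_sequences (blocks : List Int) (target : Int) (out : List (List Int)) : Prop := out = generate_ordered_sequences_alt blocks target
instance (blocks : List Int) (target : Int) (out : List (List Int)) : Decidable (Spec_generate_ordered_sequences blocks target out) := by unfold Spec_generate_ordered_sequences; infer_instance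

-- ===== CLAIM (what is proved, stated in full; the proofs are below) =====
def Claim_equal_generate_ordered_sequences : Prop := ∀ (blocks : List Int) (target : Int), Dom_generate_ordered_sequences blocks target → Pre_generate_ordered_sequences blocks target → Spec_generate_ordered_sequences blocks target (generate_ordered_sequences blocks target)

-- ===== LEMMAS AND PROOFS =====

-- Reference function: all ordered sequences of 'blocks' summing to s, in A's order.
def gseq (blocks : List Int) (s : Nat) : List (List Int) :=
  if _h : s = 0 then [[]]
  else blocks.flatMap (fun b =>
    if _hb : b ≤ (s : Int) ∧ 0 < b then
      (gseq blocks (s - b.toNat)).map (fun rest => b :: rest)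
    else [])
termination_by s
decreasing_by omega

theorem pvBacktrack_nil (blocks : List Int) (r : Int) :
    ∀ (bs path : List Int), (∀ b ∈ bs, ¬(b ≤ r ∧ 0 < b)) → pvBacktrack blocks r bs path = [] := by
  intro bs path h
  induction bs with
  | nil => simp [pvBacktrack]
  | cons b rest ih =>
    rw [pvBacktrack]
    rw [dif_neg (h b (by simp))]
    simpa using ih (fun x hx => h x (List.mem_cons_of_mem _ hx))

theorem pvBacktrack_eq (blocks : List Int) (hpos : ∀ b ∈ blocks, 0 < b) :
    ∀ (n : Nat) (r : Int), r.toNat = n → 0 < r → ∀ path,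
      pvBacktrack blocks r blocks path
        = (gseq blocks r.toNat).map (fun rest => path ++ rest) := by
  intro n
  induction n using Nat.strong_induction_on with
  | _ n IH =>
    intro r hrn hr path
    have hloop : ∀ bs, (∀ b ∈ bs, 0 < b) →
        pvBacktrack blocks r bs path
          = bs.flatMap (fun b =>
              if b ≤ r ∧ 0 < b then
                (gseq blocks (r - b).toNat).map (fun rest => path ++ b :: rest)
              else []) := by
      intro bs hbs
      induction bs with
      | nil => simp [pvBacktrack]
      | cons b rest ihbs =>
        have hb : 0 < b := hbs b (by simp)
        rw [pvBacktrack, List.flatMap_cons,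
          ihbs (fun x hx => hbs x (List.mem_cons_of_mem _ hx))]
        congr 1
        by_cases hble : b ≤ r
        · have hc : b ≤ r ∧ 0 < b := ⟨hble, hb⟩
          rw [dif_pos hc, if_pos hc]
          by_cases h0 : r - b = 0
          · rw [if_pos h0, h0]
            simp [gseq]
          · rw [if_neg h0]
            have hr' : 0 < r - b := by omega
            rw [IH (r - b).toNat (by omega) (r - b) rfl hr' (path ++ [b])]
            simp
        · rw [dif_neg (by tauto), if_neg (by tauto)]
    rw [hloop blocks hpos]
    rw [gseq, dif_neg (by omega)]
    rw [List.map_flatMap]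
    apply List.flatMap_congr
    intro b hbmem
    have hb : 0 < b := hpos b hbmem
    by_cases hble : b ≤ r
    · have hble' : b ≤ ((r.toNat : Nat) : Int) := by omega
      rw [if_pos ⟨hble, hb⟩, dif_pos ⟨hble', hb⟩]
      rw [List.map_map]
      have : r.toNat - b.toNat = (r - b).toNat := by omega
      rw [this]
      rfl
    · rw [if_neg (by tauto), dif_neg (by omega)]
      rfl

theorem getD_map_range {α : Type} (f : Nat → α) (d : α) (k m : Nat) (h : m < k) :
    ((List.range k).map f).getD m d = f m := by
  rw [List.getD_eq_getElem?_getD, List.getElem?_map, List.getElem?_range h]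
  rfl

theorem table_eq (blocks : List Int) (hpos : ∀ b ∈ blocks, 0 < b) (k : Nat) :
    (List.range k).foldl
      (fun seqs (i : Nat) =>
        let s : Int := (i : Int) + 1
        seqs ++ [blocks.flatMap (fun b =>
          if b ≤ s then (seqs.getD (s - b).toNat []).map (fun rest => b :: rest) else [])])
      [[[]]]
    = (List.range (k + 1)).map (gseq blocks) := by
  induction k with
  | zero => simp [gseq]
  | succ k ih =>
    rw [List.range_succ, List.foldl_append, ih]
    rw [List.range_succ (n := k + 1), List.map_append]
    simp only [List.foldl_cons, List.foldl_nil, List.map_cons, List.map_nil]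
    congr 1
    rw [gseq, dif_neg (by omega)]
    congr 1
    apply List.flatMap_congr
    intro b hbmem
    have hb : 0 < b := hpos b hbmem
    by_cases hble : b ≤ (k : Int) + 1
    · have hble' : b ≤ (((k + 1 : Nat) : Nat) : Int) := by push_cast; omega
      rw [if_pos hble, dif_pos ⟨hble', hb⟩]
      have hm : ((k : Int) + 1 - b).toNat < k + 1 := by omega
      rw [getD_map_range _ _ _ _ hm]
      have : ((k : Int) + 1 - b).toNat = (k + 1) - b.toNat := by omega
      rw [this]
    · rw [if_neg hble, dif_neg (by push_cast; omega)]

-- ===== VERDICT (by name: the statement is the Claim_ definition above) =====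
theorem generate_ordered_sequences_spec : Claim_equal_generate_ordered_sequences := by
  unfold Claim_equal_generate_ordered_sequences
  intro blocks target _hdom hpre
  unfold Spec_generate_ordered_sequences
  unfold generate_ordered_sequences generate_ordered_sequences_alt
  by_cases h0 : target = 0
  · subst h0
    simp
  · rcases hpre with h | hpos | ⟨hneg, hgt⟩
    · exact absurd h h0
    · rw [if_neg h0]
      by_cases hneg : target < 0
      · rw [if_pos hneg,
          pvBacktrack_nil blocks target blocks []
            (fun b hb => by have := hpos b hb; omega)]
      · rw [if_neg hneg]
        have htpos : 0 < target := by omega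
        rw [pvBacktrack_eq blocks hpos target.toNat target rfl htpos []]
        simp only []
        rw [table_eq blocks hpos target.toNat]
        rw [getD_map_range _ _ _ _ (by omega)]
        simp
    · rw [if_neg h0, if_pos hneg,
        pvBacktrack_nil blocks target blocks []
          (fun b hb => by have := hgt b hb; omega)]
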